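-- pv_equiv track=rewrite | github.com/ZhiruiYe/evo_probe | src/mutation.py | generate_single_mutants
-- ===== SOURCE A (Python) =====
-- def generate_single_mutants(seq):
--     """生成单点突变体"""
--     amino_acids = 'ACDEFGHIKLMNPQRSTVWY'
--     mutants = []
--
--     for i, aa in enumerate(seq):
--         for new_aa in amino_acids:
--             if new_aa != aa:
--                 mutant = seq[:i] + new_aa + seq[i+1:]
--                 mutants.append(mutant)
--
--     return mutants
-- ===== SOURCE B (Python) =====
-- def generate_single_mutants(seq):
--     """生成单点突变体"""
--     amino_acids = 'ACDEFGHIKLMNPQRSTVWY'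
--     mutants = []
--     prefix = ''
--     suffix = seq
--     while suffix:
--         orig = suffix[0]
--         suffix = suffix[1:]
--         for new_aa in amino_acids:
--             if new_aa != orig:
--                 mutants.append(prefix + new_aa + suffix)
--         prefix += orig
--     return mutants
-- ===== Notes on version B (the rewrite author's own statement) =====
-- stated objective: alternative
-- what changed: Replaces enumerate plus per-mutant seq[:i]/seq[i+1:] slicing with a single peeling pass that maintains a growing prefix and shrinking suffix, so each mutant is prefix + new_aa + suffix with no index arithmetic or slicing.
import Mathlib
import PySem

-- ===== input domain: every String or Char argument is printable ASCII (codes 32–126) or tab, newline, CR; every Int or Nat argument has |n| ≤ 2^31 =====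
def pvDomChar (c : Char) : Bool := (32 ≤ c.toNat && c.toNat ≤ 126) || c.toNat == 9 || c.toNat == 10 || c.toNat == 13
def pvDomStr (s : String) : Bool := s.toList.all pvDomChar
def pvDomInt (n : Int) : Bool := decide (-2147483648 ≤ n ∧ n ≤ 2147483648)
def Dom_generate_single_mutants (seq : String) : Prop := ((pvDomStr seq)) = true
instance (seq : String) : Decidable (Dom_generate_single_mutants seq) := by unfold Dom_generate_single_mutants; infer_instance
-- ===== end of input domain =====

-- B replaces enumerate + per-position slicing by one peeling pass maintaining a prefix/suffix pair (alternative, same cost).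

-- the amino-acid alphabet both versions iterate over
def aminoAcidsList : List Char := "ACDEFGHIKLMNPQRSTVWY".toList

-- ===== PORT A =====
def generate_single_mutants (seq : String) : List String :=
  let cs := seq.toList
  (PySem.List.enumerate cs 0).foldl (fun mutants p =>
    aminoAcidsList.foldl (fun mutants newAa =>
      if newAa ≠ p.2 then
        mutants ++ [String.ofList (PySem.List.slice cs none (some p.1) ++ [newAa]
                     ++ PySem.List.slice cs (some (p.1 + 1)) none)]
      else mutants) mutants) []

-- ===== PORT B =====
def genMutGo (pre : List Char) (suffix : List Char) (mutants : List String) : List String :=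
  match suffix with
  | [] => mutants
  | orig :: rest =>
    genMutGo (pre ++ [orig]) rest
      (aminoAcidsList.foldl (fun m newAa =>
        if newAa ≠ orig then m ++ [String.ofList (pre ++ [newAa] ++ rest)] else m) mutants)

def generate_single_mutants_alt (seq : String) : List String :=
  genMutGo [] seq.toList []

-- ===== PRECONDITION & SPEC =====
def Spec_generate_single_mutants (seq : String) (out : List String) : Prop := out = generate_single_mutants_alt seq
instance (seq : String) (out : List String) : Decidable (Spec_generate_single_mutants seq out) := by unfold Spec_generate_single_mutants; infer_instance

-- ===== CLAIM (what is proved, stated in full; the proofs are below) =====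
def Claim_equal_generate_single_mutants : Prop := ∀ (seq : String), Dom_generate_single_mutants seq → Spec_generate_single_mutants seq (generate_single_mutants seq)

-- ===== LEMMAS AND PROOFS =====

-- the inner (amino-acid) loop of A over position i = pre.length in cs = pre ++ aa :: rest
-- is exactly B's inner loop with the maintained prefix and suffix.
lemma inner_eq (pre rest : List Char) (aa : Char) (m : List String) :
    aminoAcidsList.foldl (fun m newAa =>
      if newAa ≠ aa then
        m ++ [String.ofList (PySem.List.slice (pre ++ aa :: rest) none (some (pre.length : Int)) ++ [newAa]
               ++ PySem.List.slice (pre ++ aa :: rest) (some ((pre.length : Int) + 1)) none)]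
      else m) m
    = aminoAcidsList.foldl (fun m newAa =>
        if newAa ≠ aa then m ++ [String.ofList (pre ++ [newAa] ++ rest)] else m) m := by
  have h1 : PySem.List.slice (pre ++ aa :: rest) none (some (pre.length : Int)) = pre := by
    rw [PySem.List.slice_to_natCast]
    simp
  have h2 : PySem.List.slice (pre ++ aa :: rest) (some ((pre.length : Int) + 1)) none = rest := by
    have : ((pre.length : Int) + 1) = ((pre.length + 1 : Nat) : Int) := by push_cast; ring
    rw [this, PySem.List.slice_from_natCast]
    have : pre ++ aa :: rest = (pre ++ [aa]) ++ rest := by simp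
    rw [this, List.drop_left' (by simp)]
  rw [h1, h2]

-- A's outer fold over the enumeration of the suffix equals B's recursion on the suffix.
lemma go_eq (suffix : List Char) : ∀ (pre : List Char) (acc : List String),
    (PySem.List.enumerate suffix (pre.length : Int)).foldl (fun mutants p =>
      aminoAcidsList.foldl (fun mutants newAa =>
        if newAa ≠ p.2 then
          mutants ++ [String.ofList (PySem.List.slice (pre ++ suffix) none (some p.1) ++ [newAa]
                       ++ PySem.List.slice (pre ++ suffix) (some (p.1 + 1)) none)]
        else mutants) mutants) acc
    = genMutGo pre suffix acc := by
  induction suffix with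
  | nil => intro pre acc; simp [genMutGo, PySem.List.enumerate_nil]
  | cons aa rest ih =>
    intro pre acc
    rw [PySem.List.enumerate_cons, List.foldl_cons]
    have hlen : (pre.length : Int) + 1 = ((pre ++ [aa]).length : Int) := by simp
    have hcs : pre ++ aa :: rest = (pre ++ [aa]) ++ rest := by simp
    rw [inner_eq pre rest aa acc, hlen, hcs, ih (pre ++ [aa])]
    rfl

-- ===== VERDICT (by name: the statement is the Claim_ definition above) =====
theorem generate_single_mutants_spec : Claim_equal_generate_single_mutants := by
  intro seq _
  unfold Spec_generate_single_mutants generate_single_mutants generate_single_mutants_alt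
  have := go_eq seq.toList [] []
  simpa using this
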